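-- pv_equiv track=rewrite | github.com/JulianPMenon/fedex-lora | sorf_vera.py | _power2_partition
-- ===== SOURCE A (Python) =====
-- def _power2_partition(n):
--     """Partition n into descending powers of two."""
--     if n <= 0:
--         raise ValueError("n must be positive")
--
--     parts = []
--     rem = n
--     while rem > 0:
--         block = 1 << (rem.bit_length() - 1)
--         parts.append(block)
--         rem -= block
--     return parts
-- ===== SOURCE B (Python) =====
-- def _power2_partition(n):
--     """Partition n into descending powers of two."""
--     if n <= 0:
--         raise ValueError("n must be positive")
--
--     parts = []
--     i = n.bit_length() - 1
--     while i >= 0: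
--         if (n >> i) & 1:
--             parts.append(1 << i)
--         i -= 1
--     return parts
-- ===== Notes on version B (the rewrite author's own statement) =====
-- stated objective: alternative
-- what changed: B scans every bit position of n from the top down and appends 1<<i when bit i is set, instead of A's repeated locate-highest-bit-and-subtract loop that mutates a remainder.
import Mathlib
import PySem

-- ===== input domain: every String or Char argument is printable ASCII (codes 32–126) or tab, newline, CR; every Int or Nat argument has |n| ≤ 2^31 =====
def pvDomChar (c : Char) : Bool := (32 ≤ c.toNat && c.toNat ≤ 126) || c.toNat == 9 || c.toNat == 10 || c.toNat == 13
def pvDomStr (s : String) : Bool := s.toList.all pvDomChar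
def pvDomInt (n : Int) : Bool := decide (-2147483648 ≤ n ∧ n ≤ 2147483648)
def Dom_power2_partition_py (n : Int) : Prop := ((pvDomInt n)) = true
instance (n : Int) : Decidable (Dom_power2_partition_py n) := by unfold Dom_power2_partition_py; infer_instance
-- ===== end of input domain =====

-- B replaces A's locate-highest-bit-and-subtract remainder loop by a single top-down scan
-- of the bit positions of n (append 1 << i when bit i is set); same descending list, alternative decomposition.
-- ===== PORT A =====
-- A's while-loop: find the highest set bit of the remainder, append it, subtract it.
def pvLoopA (rem : Int) (parts : List Int) : List Int :=
  if _h : rem > 0 then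
    let block : Int := 1 <<< (PySem.Int.bitLength rem - 1)
    pvLoopA (rem - block) (parts ++ [block])
  else parts
termination_by rem.toNat
decreasing_by
  have h1 : 2 ^ (PySem.Int.bitLength rem - 1) ≤ rem.natAbs :=
    PySem.Int.two_pow_bitLength_le rem (by omega)
  have h2 : (1 <<< (PySem.Int.bitLength rem - 1) : Nat) = 2 ^ (PySem.Int.bitLength rem - 1) :=
    Nat.one_shiftLeft _
  have h3 : 0 < 2 ^ (PySem.Int.bitLength rem - 1) := Nat.two_pow_pos _
  omega

-- Port of A (raises ValueError on n ≤ 0: excluded by Pre_; returns [] there).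
def power2_partition_py (n : Int) : List Int :=
  if n ≤ 0 then [] else pvLoopA n []

-- ===== PORT B =====
-- B's while-loop counting i from bit_length-1 down to 0; recursion on k = i + 1.
-- (n >> i) & 1 with i ≥ 0 throughout, so the shift count is the Nat k.
def pvScanB (n : Int) : Nat → List Int
  | 0 => []
  | k + 1 => (if PySem.Int.band (n >>> k) 1 ≠ 0 then [(1 : Int) <<< k] else []) ++ pvScanB n k

def power2_partition_py_alt (n : Int) : List Int :=
  if n ≤ 0 then [] else pvScanB n (PySem.Int.bitLength n)

-- ===== PRECONDITION & SPEC =====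
-- Pre_ excludes exactly n ≤ 0, where the Python A raises ValueError.
def Pre_power2_partition_py (n : Int) : Prop := 0 < n
instance (n : Int) : Decidable (Pre_power2_partition_py n) := by unfold Pre_power2_partition_py; infer_instance
def pvWitness_power2_partition_py : Int := (5)
def Spec_power2_partition_py (n : Int) (out : List Int) : Prop := out = power2_partition_py_alt n
instance (n : Int) (out : List Int) : Decidable (Spec_power2_partition_py n out) := by unfold Spec_power2_partition_py; infer_instance

-- ===== CLAIM (what is proved, stated in full; the proofs are below) =====
def Claim_equal_power2_partition_py : Prop := ∀ (n : Int), Dom_power2_partition_py n → Pre_power2_partition_py n → Spec_power2_partition_py n (power2_partition_py n)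

-- ===== LEMMAS AND PROOFS =====

-- Proof-side canonical form of B's scan, over Nat and Nat.testBit.
def pvScanN (m : Nat) : Nat → List Int
  | 0 => []
  | k + 1 => (if m.testBit k then [((2 ^ k : Nat) : Int)] else []) ++ pvScanN m k

theorem pvScanB_cast (m : Nat) : ∀ k, pvScanB (m : Int) k = pvScanN m k := by
  intro k
  induction k with
  | zero => rfl
  | succ k ih =>
    have hsh : ((m : Int) >>> k) = ((m >>> k : Nat) : Int) := by simp
    have hb : (PySem.Int.band ((m : Int) >>> k) 1 ≠ 0) ↔ m.testBit k := by
      rw [hsh, show ((1:Int) = ((1:Nat):Int)) from rfl, PySem.Int.band_natCast,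
        Nat.shiftRight_eq_div_pow, Nat.and_one_is_mod, Nat.testBit_eq_decide_div_mod_eq]
      simp only [ne_eq, Int.natCast_eq_zero, decide_eq_true_eq]
      omega
    simp only [pvScanB, pvScanN, ih]
    by_cases h : m.testBit k
    · rw [if_pos (hb.mpr h), if_pos h]
      simp [Int.shiftLeft_eq]
    · rw [if_neg (fun hc => h (hb.mp hc)), if_neg h]

theorem pvScanN_zero : ∀ k, pvScanN 0 k = [] := by
  intro k; induction k with
  | zero => rfl
  | succ k ih => simp [pvScanN, ih]

theorem pvScanN_mod (k m : Nat) : pvScanN (m % 2 ^ k) k = pvScanN m k := by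
  induction k generalizing m with
  | zero => rfl
  | succ k ih =>
    have hbit : (m % 2 ^ (k + 1)).testBit k = m.testBit k := by
      rw [Nat.testBit_mod_two_pow]; simp
    have hrec : pvScanN (m % 2 ^ (k + 1)) k = pvScanN m k := by
      rw [← ih (m % 2 ^ (k + 1)), Nat.mod_mod_of_dvd _ (pow_dvd_pow 2 (Nat.le_succ k)), ih]
    simp only [pvScanN, hbit, hrec]

theorem pvBitLength_eq (k : Nat) : ∀ m : Nat, 2 ^ k ≤ m → m < 2 ^ (k + 1) →
    PySem.Int.bitLength (m : Int) = k + 1 := by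
  induction k with
  | zero =>
    intro m h1 h2
    have : m = 1 := by omega
    subst this; decide
  | succ k ih =>
    intro m h1 h2
    have hm : 0 < m := by have := Nat.two_pow_pos (k+1); omega
    have h1' : 2 ^ k ≤ m / 2 := by
      have : 2 ^ (k + 1) = 2 ^ k * 2 := by ring
      omega
    have h2' : m / 2 < 2 ^ (k + 1) := by
      have : 2 ^ (k + 2) = 2 ^ (k + 1) * 2 := by ring
      omega
    rw [PySem.Int.bitLength_natCast hm, ih (m / 2) h1' h2']

theorem pvMain (k : Nat) : ∀ (m : Nat), m < 2 ^ k → ∀ acc,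
    pvLoopA (m : Int) acc = acc ++ pvScanN m k := by
  induction k with
  | zero =>
    intro m hm acc
    have : m = 0 := by omega
    subst this
    rw [pvLoopA.eq_def]; simp [pvScanN]
  | succ k ih =>
    intro m hm acc
    by_cases hz : m = 0
    · subst hz; rw [pvLoopA.eq_def]; simp [pvScanN_zero]
    · have hmpos : 0 < m := Nat.pos_of_ne_zero hz
      have hdiv : m.testBit k = decide (m / 2 ^ k % 2 = 1) := Nat.testBit_eq_decide_div_mod_eq
      have hp : (0:Nat) < 2 ^ k := Nat.two_pow_pos k
      by_cases hb : m.testBit k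
      · -- bit k set: 2^k ≤ m, A strips exactly 2^k
        have hge : 2 ^ k ≤ m := by
          by_contra hlt
          have : m / 2 ^ k = 0 := Nat.div_eq_of_lt (by omega)
          rw [hdiv] at hb; simp [this] at hb
        have hbl : PySem.Int.bitLength (m : Int) = k + 1 := pvBitLength_eq k m hge hm
        have hblock : (1 <<< (PySem.Int.bitLength (m : Int) - 1) : Nat) = 2 ^ k := by
          rw [hbl]; simp [Nat.one_shiftLeft]
        rw [pvLoopA.eq_def, dif_pos (by exact_mod_cast hmpos)]
        simp only [hblock]
        have hsub : (m : Int) - ((2 ^ k : Nat) : Int) = ((m - 2 ^ k : Nat) : Int) := by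
          have : 2 ^ k ≤ m := hge
          push_cast [this]; ring
        rw [hsub, ih (m - 2 ^ k) (by omega) (acc ++ [((2 ^ k : Nat) : Int)])]
        have hpow2 : 2 ^ (k + 1) = 2 ^ k * 2 := by ring
        have hmod : m - 2 ^ k = m % 2 ^ k := by
          rw [Nat.mod_eq_sub_mod hge, Nat.mod_eq_of_lt (by omega)]
        rw [hmod, pvScanN_mod]
        simp [pvScanN, hb]
      · -- bit k clear: m < 2^k, scan at k+1 = scan at k
        have hlt : m < 2 ^ k := by
          by_contra hge
          have h1 : m / 2 ^ k = 1 := by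
            apply Nat.div_eq_of_lt_le (by omega)
            have : 2 ^ (k + 1) = 2 ^ k * 2 := by ring
            omega
          rw [hdiv] at hb; simp [h1] at hb
        rw [ih m hlt acc]
        simp [pvScanN, hb]

-- ===== VERDICT (by name: the statement is the Claim_ definition above) =====
theorem power2_partition_py_spec : Claim_equal_power2_partition_py := by
  intro n _ hpre
  unfold Spec_power2_partition_py power2_partition_py power2_partition_py_alt
  have hn : ¬ n ≤ 0 := by exact not_le.mpr hpre
  rw [if_neg hn, if_neg hn]
  have hcast : ((n.toNat : Nat) : Int) = n := by omega
  have hlt : n.toNat < 2 ^ PySem.Int.bitLength n := by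
    have := PySem.Int.lt_two_pow_bitLength n
    omega
  calc pvLoopA n [] = pvLoopA ((n.toNat : Nat) : Int) [] := by rw [hcast]
    _ = [] ++ pvScanN n.toNat (PySem.Int.bitLength n) := by
        rw [pvMain (PySem.Int.bitLength n) n.toNat hlt]
    _ = pvScanB ((n.toNat : Nat) : Int) (PySem.Int.bitLength n) := by
        rw [pvScanB_cast]; simp
    _ = pvScanB n (PySem.Int.bitLength n) := by rw [hcast]
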